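-- pv_equiv track=rewrite | github.com/matthiaskoenig/tellurium-web | teweb/combine/utils/tree.py | directories_from_filename
-- ===== SOURCE A (Python) =====
-- def directories_from_filename(filename):
--     """ All parent directories from filename for tree.
--
--     :param filename:
--     :return:
--     """
--     tokens = filename.split('/')
--     dirs = set()
--     directory = None
--     for k, token in enumerate(tokens[:-1]):
--         if k == 0:
--             directory = token
--         else:
--             directory = directory + '/' + token
--         dirs.add(directory + '/')
--     return dirs
-- ===== SOURCE B (Python) =====
-- def directories_from_filename(filename):
--     """ All parent directories from filename for tree.
--
--     :param filename:
--     :return: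
--     """
--     tokens = filename.split('/')
--     return {'/'.join(tokens[:i + 1]) + '/' for i in range(len(tokens) - 1)}
-- ===== Notes on version B (the rewrite author's own statement) =====
-- stated objective: simpler
-- what changed: Drops the running `directory` accumulator and the k==0 branch: each parent prefix is rebuilt directly by sep-joining a front slice of the token list inside a set comprehension.
import Mathlib
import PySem

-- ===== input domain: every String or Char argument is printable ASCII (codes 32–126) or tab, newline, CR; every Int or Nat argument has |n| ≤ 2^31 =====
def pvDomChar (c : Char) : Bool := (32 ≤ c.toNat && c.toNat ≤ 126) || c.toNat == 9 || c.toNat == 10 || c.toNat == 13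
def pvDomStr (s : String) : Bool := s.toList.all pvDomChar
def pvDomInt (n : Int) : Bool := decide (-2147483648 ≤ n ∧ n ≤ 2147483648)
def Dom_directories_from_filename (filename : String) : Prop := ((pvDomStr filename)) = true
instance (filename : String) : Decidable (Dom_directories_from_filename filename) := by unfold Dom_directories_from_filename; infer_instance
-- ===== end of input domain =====

-- B rebuilds each parent prefix directly as '/'.join of a front token slice in a set
-- comprehension, dropping A's running `directory` accumulator and its k==0 branch (simpler).


-- ===== PORT A =====
-- Python's `directory = None` is modelled by the dummy "" : the `k == 0` branch always
-- assigns `directory` before its first use, so the initial value is never read.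
def directories_from_filename (filename : String) : List String :=
  let tokens := (PySem.Str.split? filename "/").getD []   -- sep "/" ≠ "", so split? is always `some`
  let p := (PySem.List.enumerate (PySem.List.slice tokens none (some (-1)))).foldl
    (fun (st : PySem.Set String × String) kt =>
      let directory := if kt.1 = 0 then kt.2 else st.2 ++ "/" ++ kt.2
      (PySem.Set.add st.1 (directory ++ "/"), directory))
    (PySem.Set.empty, "")
  p.1

-- ===== PORT B =====
def directories_from_filename_alt (filename : String) : List String :=
  let tokens := (PySem.Str.split? filename "/").getD []   -- sep "/" ≠ "", so split? is always `some`
  PySem.Set.ofList ((List.range (tokens.length - 1)).map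
    (fun i => PySem.Str.join "/" (tokens.take (i + 1)) ++ "/"))

-- ===== PRECONDITION & SPEC =====
def Spec_directories_from_filename (filename : String) (out : List String) : Prop := out = directories_from_filename_alt filename
instance (filename : String) (out : List String) : Decidable (Spec_directories_from_filename filename out) := by unfold Spec_directories_from_filename; infer_instance

-- ===== CLAIM (what is proved, stated in full; the proofs are below) =====
def Claim_equal_directories_from_filename : Prop := ∀ (filename : String), Dom_directories_from_filename filename → Spec_directories_from_filename filename (directories_from_filename filename)

-- ===== LEMMAS AND PROOFS =====

-- The prefixes A's accumulator produces while folding over the remaining tokens `l`,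
-- the accumulator currently being `dir`.
def pvPrefs (dir : String) : List String → List String
  | [] => []
  | t :: r => (dir ++ "/" ++ t ++ "/") :: pvPrefs (dir ++ "/" ++ t) r

-- The prefixes B produces from token list `t :: r`.
def pvPrefs2 (t : String) : List String → List String
  | [] => []
  | x :: r => (t ++ "/") :: pvPrefs2 (t ++ "/" ++ x) r

lemma pv_join_singleton (t : String) : PySem.Str.join "/" [t] = t := by
  apply String.ext
  simp [PySem.Str.toList_join, PySem.Chars.join_singleton]

lemma pv_join_cons2 (a b : String) (l : List String) :
    PySem.Str.join "/" (a :: b :: l) = PySem.Str.join "/" ((a ++ "/" ++ b) :: l) := by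
  apply String.ext
  cases l with
  | nil => simp [PySem.Str.toList_join, PySem.Chars.join_cons_cons, PySem.Chars.join_singleton]
  | cons c r =>
    simp [PySem.Str.toList_join, PySem.Chars.join_cons_cons]

lemma pvPrefs_len (l : List String) : ∀ (dir : String), ∀ x ∈ pvPrefs dir l, dir.toList.length + 2 ≤ x.toList.length := by
  induction l with
  | nil => intro dir x hx; simp [pvPrefs] at hx
  | cons t r ih =>
    intro dir x hx
    simp only [pvPrefs, List.mem_cons] at hx
    rcases hx with h | h
    · subst h; simp
    · have := ih (dir ++ "/" ++ t) x h
      simp at this ⊢; omega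

lemma pvPrefs_nodup (l : List String) : ∀ (dir : String), (pvPrefs dir l).Nodup := by
  induction l with
  | nil => intro dir; simp [pvPrefs]
  | cons t r ih =>
    intro dir
    refine List.Nodup.cons ?_ (ih (dir ++ "/" ++ t))
    intro hmem
    have := pvPrefs_len r (dir ++ "/" ++ t) _ hmem
    simp at this; omega

lemma pv_head_not_mem (t : String) (l : List String) : (t ++ "/") ∉ pvPrefs t l := by
  intro hmem
  have := pvPrefs_len l t _ hmem
  simp at this

lemma pv_foldA (l : List String) : ∀ (s : Int), 1 ≤ s → ∀ (dirs : PySem.Set String) (dir : String),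
    ((PySem.List.enumerate l s).foldl
      (fun (st : PySem.Set String × String) kt =>
        (PySem.Set.add st.1 ((if kt.1 = 0 then kt.2 else st.2 ++ "/" ++ kt.2) ++ "/"),
         if kt.1 = 0 then kt.2 else st.2 ++ "/" ++ kt.2))
      (dirs, dir)).1 = PySem.Set.update dirs (pvPrefs dir l) := by
  induction l with
  | nil => intro s hs dirs dir; simp [PySem.List.enumerate_nil, pvPrefs, PySem.Set.update]
  | cons x xs ih =>
    intro s hs dirs dir
    rw [PySem.List.enumerate_cons]
    simp only [List.foldl_cons]
    have hs0 : ¬ ((s, x).1 = 0) := by simp; omega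
    rw [if_neg hs0]
    rw [ih (s + 1) (by omega)]
    simp [pvPrefs, PySem.Set.update]

lemma pv_mapB (r : List String) : ∀ (t : String),
    (List.range r.length).map (fun i => PySem.Str.join "/" (t :: r.take i) ++ "/") = pvPrefs2 t r := by
  induction r with
  | nil => intro t; simp [pvPrefs2]
  | cons x r' ih =>
    intro t
    rw [List.length_cons, List.range_succ_eq_map, List.map_cons, List.map_map]
    simp only [List.take_zero, Function.comp_def, Nat.succ_eq_add_one, List.take_succ_cons]
    rw [pv_join_singleton]
    show _ :: _ = pvPrefs2 t (x :: r')
    simp only [pvPrefs2]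
    congr 1
    have : ∀ i, PySem.Str.join "/" (t :: x :: r'.take i) = PySem.Str.join "/" ((t ++ "/" ++ x) :: r'.take i) :=
      fun i => pv_join_cons2 t x (r'.take i)
    simp only [this]
    exact ih (t ++ "/" ++ x)

lemma pvPrefs2_eq (r : List String) : ∀ (t : String), r ≠ [] →
    pvPrefs2 t r = (t ++ "/") :: pvPrefs t r.dropLast := by
  induction r with
  | nil => intro t h; exact absurd rfl h
  | cons x r' ih =>
    intro t _
    cases r' with
    | nil => simp [pvPrefs2, pvPrefs]
    | cons y r'' =>
      rw [List.dropLast_cons₂]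
      show (t ++ "/") :: pvPrefs2 (t ++ "/" ++ x) (y :: r'') =
        (t ++ "/") :: pvPrefs t (x :: (y :: r'').dropLast)
      rw [ih (t ++ "/" ++ x) (by simp)]
      rfl

lemma pv_add_empty (x : String) : PySem.Set.add PySem.Set.empty x = [x] := by
  simp [PySem.Set.add, PySem.Set.empty, PySem.Set.contains]

lemma pv_main (ts : List String) :
    (let p := (PySem.List.enumerate (PySem.List.slice ts none (some (-1)))).foldl
      (fun (st : PySem.Set String × String) kt =>
        (PySem.Set.add st.1 ((if kt.1 = 0 then kt.2 else st.2 ++ "/" ++ kt.2) ++ "/"),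
         if kt.1 = 0 then kt.2 else st.2 ++ "/" ++ kt.2))
      (PySem.Set.empty, "")
     p.1) =
    PySem.Set.ofList ((List.range (ts.length - 1)).map
      (fun i => PySem.Str.join "/" (ts.take (i + 1)) ++ "/")) := by
  rw [PySem.List.slice_to_neg_one]
  cases ts with
  | nil => simp [PySem.List.enumerate_nil, PySem.Set.empty, PySem.Set.ofList]
  | cons t rest =>
    cases rest with
    | nil => simp [PySem.List.enumerate_nil, PySem.Set.empty, PySem.Set.ofList]
    | cons x r =>
      -- B side
      have hB : (List.range ((t :: x :: r).length - 1)).map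
          (fun i => PySem.Str.join "/" ((t :: x :: r).take (i + 1)) ++ "/")
          = (t ++ "/") :: pvPrefs t ((x :: r).dropLast) := by
        have h1 : (t :: x :: r).length - 1 = (x :: r).length := by simp
        rw [h1]
        have h2 : ∀ i, (t :: x :: r).take (i + 1) = t :: (x :: r).take i := by
          intro i; simp [List.take_succ_cons]
        simp only [h2]
        rw [pv_mapB (x :: r) t, pvPrefs2_eq (x :: r) t (by simp)]
      -- A side
      rw [List.dropLast_cons₂, PySem.List.enumerate_cons]
      simp only [List.foldl_cons]
      simp only [if_true]
      rw [pv_foldA ((x :: r).dropLast) (0 + 1) (by omega)]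
      rw [pv_add_empty]
      rw [PySem.Set.update_eq_append_of_disjoint _ _ (pvPrefs_nodup _ t)
        (by intro y hy; simp only [List.mem_singleton]
            intro he
            have := pvPrefs_len _ t _ hy
            subst he
            simp at this)]
      rw [hB]
      rw [PySem.Set.ofList_eq_self_of_nodup]
      · rfl
      · exact List.Nodup.cons (pv_head_not_mem t _) (pvPrefs_nodup _ t)

-- ===== VERDICT (by name: the statement is the Claim_ definition above) =====
theorem directories_from_filename_spec : Claim_equal_directories_from_filename := by
  intro filename _
  unfold Spec_directories_from_filename directories_from_filename directories_from_filename_alt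
  exact pv_main ((PySem.Str.split? filename "/").getD [])
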